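-- pv_equiv track=rewrite | github.com/robagliom/AlgoritmosGeneticos | TP2/tp2.py | maximo_valor_posible
-- ===== SOURCE A (Python) =====
-- def maximo_valor_posible(lista_objetos,Vmax):
--     valor_acum = 0
--     vol_acum = 0
--     for objeto in lista_objetos:
--         vol_acum += objeto[0]
--         if vol_acum <= Vmax:
--             valor_acum += objeto[1]
--         else:
--             #supera volumen máximo
--             return 0,0
--     return valor_acum,vol_acum
-- ===== SOURCE B (Python) =====
-- from itertools import accumulate
--
-- def maximo_valor_posible(lista_objetos, Vmax):
--     prefixes = list(accumulate(o[0] for o in lista_objetos))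
--     if any(p > Vmax for p in prefixes):
--         return 0, 0
--     return sum(o[1] for o in lista_objetos), (prefixes[-1] if prefixes else 0)
-- ===== Notes on version B (the rewrite author's own statement) =====
-- stated objective: alternative
-- what changed: Replaces the stateful loop with early return by a prefix-sum (itertools.accumulate) formulation: compute all volume prefixes at once, test any(p > Vmax), and otherwise return the value sum and last prefix.
import Mathlib
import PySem

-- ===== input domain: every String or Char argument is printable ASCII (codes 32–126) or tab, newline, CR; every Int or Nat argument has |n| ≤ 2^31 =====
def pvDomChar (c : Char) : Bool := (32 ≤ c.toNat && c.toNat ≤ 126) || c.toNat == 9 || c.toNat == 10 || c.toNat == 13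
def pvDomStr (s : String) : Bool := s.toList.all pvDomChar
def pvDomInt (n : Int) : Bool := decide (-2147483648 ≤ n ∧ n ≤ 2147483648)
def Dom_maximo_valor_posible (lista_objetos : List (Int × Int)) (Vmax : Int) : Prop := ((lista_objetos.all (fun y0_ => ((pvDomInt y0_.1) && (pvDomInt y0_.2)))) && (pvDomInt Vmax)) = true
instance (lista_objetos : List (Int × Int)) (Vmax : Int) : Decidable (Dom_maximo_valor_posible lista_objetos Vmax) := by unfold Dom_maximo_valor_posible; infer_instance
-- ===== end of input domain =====

-- B replaces A's stateful early-return loop by a prefix-sum formulation (alternative decomposition, same cost).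

-- ===== PORT A =====
-- A's for-loop with accumulators valor_acum/vol_acum and early return, as structural recursion.
def maximoValorGoA : List (Int × Int) → Int → Int → Int → Int × Int
  | [], valor_acum, vol_acum, _ => (valor_acum, vol_acum)
  | objeto :: rest, valor_acum, vol_acum, Vmax =>
      let vol_acum' := vol_acum + objeto.1
      if vol_acum' ≤ Vmax then maximoValorGoA rest (valor_acum + objeto.2) vol_acum' Vmax
      else (0, 0)

def maximo_valor_posible (lista_objetos : List (Int × Int)) (Vmax : Int) : Int × Int :=
  maximoValorGoA lista_objetos 0 0 Vmax

-- ===== PORT B =====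
-- Source B: prefixes = accumulate of the volumes (scanl from 0 with the initial 0 dropped); any prefix > Vmax → (0,0);
-- otherwise (sum of values, last prefix or 0 when empty).
def maximo_valor_posible_alt (lista_objetos : List (Int × Int)) (Vmax : Int) : Int × Int :=
  let prefixes := (List.scanl (· + ·) 0 (lista_objetos.map Prod.fst)).tail
  if prefixes.any (fun p => decide (Vmax < p)) then (0, 0)
  else ((lista_objetos.map Prod.snd).sum, prefixes.getLast?.getD 0)

-- ===== PRECONDITION & SPEC =====
def Spec_maximo_valor_posible (lista_objetos : List (Int × Int)) (Vmax : Int) (out : Int × Int) : Prop := out = maximo_valor_posible_alt lista_objetos Vmax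
instance (lista_objetos : List (Int × Int)) (Vmax : Int) (out : Int × Int) : Decidable (Spec_maximo_valor_posible lista_objetos Vmax out) := by unfold Spec_maximo_valor_posible; infer_instance

-- ===== CLAIM (what is proved, stated in full; the proofs are below) =====
def Claim_equal_maximo_valor_posible : Prop := ∀ (lista_objetos : List (Int × Int)) (Vmax : Int), Dom_maximo_valor_posible lista_objetos Vmax → Spec_maximo_valor_posible lista_objetos Vmax (maximo_valor_posible lista_objetos Vmax)

-- ===== LEMMAS AND PROOFS =====

theorem any_scanl_head (xs : List Int) (c : Int) (f : Int → Bool) :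
    (List.scanl (· + ·) c xs).any f = (f c || (List.scanl (· + ·) c xs).tail.any f) := by
  cases xs <;> simp [List.scanl_cons]

theorem foldl_add_eq_sum (xs : List Int) : ∀ c : Int, List.foldl (· + ·) c xs = c + xs.sum := by
  induction xs with
  | nil => intro c; simp
  | cons x xs ih => intro c; simp [List.foldl_cons, ih (c + x), List.sum_cons]; omega

-- Characterisation of A's loop in terms of the prefix sums starting at vol_acum.
theorem goA_eq (Vmax : Int) (l : List (Int × Int)) :
    ∀ (valor_acum vol_acum : Int),
      maximoValorGoA l valor_acum vol_acum Vmax =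
        if (List.scanl (· + ·) vol_acum (l.map Prod.fst)).tail.any (fun p => decide (Vmax < p)) then (0, 0)
        else (valor_acum + (l.map Prod.snd).sum, vol_acum + (l.map Prod.fst).sum) := by
  induction l with
  | nil => intro valor vol; simp [maximoValorGoA]
  | cons o rest ih =>
      intro valor vol
      simp only [maximoValorGoA, List.map_cons, List.scanl_cons, List.tail_cons]
      by_cases h : vol + o.1 ≤ Vmax
      · rw [if_pos h, ih (valor + o.2) (vol + o.1)]
        have hfalse : decide (Vmax < vol + o.1) = false := by simp; omega
        rw [any_scanl_head]
        simp only [hfalse, Bool.false_or]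
        split
        · rfl
        · simp only [List.sum_cons, Prod.mk.injEq]; constructor <;> omega
      · rw [if_neg h]
        have htrue : decide (Vmax < vol + o.1) = true := by simp; omega
        rw [any_scanl_head]
        simp [htrue]

-- ===== VERDICT (by name: the statement is the Claim_ definition above) =====
theorem maximo_valor_posible_spec : Claim_equal_maximo_valor_posible := by
  intro l Vmax _
  unfold Spec_maximo_valor_posible maximo_valor_posible maximo_valor_posible_alt
  rw [goA_eq]
  simp only [Int.zero_add]
  split
  · rfl
  · rcases hm : l.map Prod.fst with _ | ⟨x, xs⟩
    · simp
    · rw [List.scanl_cons, List.tail_cons, List.getLast?_scanl]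
      simp only [foldl_add_eq_sum, List.sum_cons, Option.getD_some, Prod.mk.injEq, true_and]
      omega
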